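-- pv_equiv track=rewrite | github.com/matteougolotti/advent_of_code_2023 | 1/part_2.py | get_last_digit
-- ===== SOURCE A (Python) =====
-- ALPHABETIC_DIGITS = [
--     "one",
--     "two",
--     "three",
--     "four",
--     "five",
--     "six",
--     "seven",
--     "eight",
--     "nine",
-- ]
--
-- NUMERIC_DIGITS = [
--     "1",
--     "2",
--     "3",
--     "4",
--     "5",
--     "6",
--     "7",
--     "8",
--     "9",
-- ]
--
-- ALL_DIGITS = ALPHABETIC_DIGITS + NUMERIC_DIGITS
--
-- DIGITS_MAP = {
--     "one": 1,
--     "two": 2,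
--     "three": 3,
--     "four": 4,
--     "five": 5,
--     "six": 6,
--     "seven": 7,
--     "eight": 8,
--     "nine": 9,
-- }
--
-- def get_last_digit(line: str) -> int:
--     all_digit_last_indexes_in_line = [(line.rfind(digit), digit) for digit in ALL_DIGITS]
--     digit_last_indexes_in_line = [
--         (index, digit)
--         for index, digit in all_digit_last_indexes_in_line
--         if index != -1
--     ]
--
--     last_digit = max(digit_last_indexes_in_line)[1]
--
--     return convert(digit=last_digit)
--
-- def convert(digit: str) -> int:
--     if digit in NUMERIC_DIGITS:
--         return int(digit)
--     if digit in ALPHABETIC_DIGITS: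
--         return DIGITS_MAP[digit]
--     raise Exception("Unknown digit")
-- ===== SOURCE B (Python) =====
-- WORD_VALUES = [
--     ("one", 1),
--     ("two", 2),
--     ("three", 3),
--     ("four", 4),
--     ("five", 5),
--     ("six", 6),
--     ("seven", 7),
--     ("eight", 8),
--     ("nine", 9),
-- ]
--
-- def get_last_digit(line):
--     # Single backward scan over positions: the first position (from the end)
--     # where a numeral or a spelled-out digit starts is the last-starting match.
--     for i in range(len(line) - 1, -1, -1):
--         c = line[i]
--         if '1' <= c <= '9':
--             return ord(c) - ord('0')
--         for word, value in WORD_VALUES: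
--             if line.startswith(word, i):
--                 return value
--     raise ValueError("no digit in line")
-- ===== Notes on version B (the rewrite author's own statement) =====
-- stated objective: faster
-- what changed: Replaces A's 18 whole-line rfind scans plus a max() over (index, pattern) tuples with a single backward scan over positions that stops at the first (i.e. last-starting) numeral or word-digit match.
import Mathlib
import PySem

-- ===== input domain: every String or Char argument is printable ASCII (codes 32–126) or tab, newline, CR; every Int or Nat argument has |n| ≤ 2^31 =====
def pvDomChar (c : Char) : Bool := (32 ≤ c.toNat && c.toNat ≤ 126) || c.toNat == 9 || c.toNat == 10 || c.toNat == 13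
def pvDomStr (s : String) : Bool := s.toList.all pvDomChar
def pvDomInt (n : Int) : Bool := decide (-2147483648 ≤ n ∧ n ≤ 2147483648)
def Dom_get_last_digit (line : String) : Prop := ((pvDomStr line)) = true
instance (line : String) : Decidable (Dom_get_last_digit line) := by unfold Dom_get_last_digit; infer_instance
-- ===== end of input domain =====

-- ===== PORT A =====
-- B replaces A's 18 whole-line rfind scans + max() with ONE backward scan over positions.

-- ALPHABETIC_DIGITS / NUMERIC_DIGITS / ALL_DIGITS / DIGITS_MAP from the module
def pvALPHA : List String :=
  ["one", "two", "three", "four", "five", "six", "seven", "eight", "nine"]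

def pvNUM : List String := ["1", "2", "3", "4", "5", "6", "7", "8", "9"]

def pvALL : List String := pvALPHA ++ pvNUM

def pvDIGITS_MAP : PySem.Dict String Int :=
  ((((((((PySem.Dict.empty.insert "one" 1).insert "two" 2).insert "three" 3).insert
      "four" 4).insert "five" 5).insert "six" 6).insert "seven" 7).insert
      "eight" 8).insert "nine" 9

-- convert(digit); the final 'raise Exception' branch is `none` (unreachable from A's call site)
def pvConvert? (digit : String) : Option Int :=
  if pvNUM.contains digit then PySem.Int.ofStr? digit
  else if pvALPHA.contains digit then pvDIGITS_MAP.get? digit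
  else none

def get_last_digit (line : String) : Int :=
  let all_digit_last_indexes_in_line := pvALL.map (fun digit => (PySem.Str.rfind line digit, digit))
  let digit_last_indexes_in_line := all_digit_last_indexes_in_line.filter (fun p => p.1 != -1)
  -- Python max() on tuples = lexicographic maximum; raises ValueError on [] (excluded by Pre_)
  match PySem.List.max? digit_last_indexes_in_line (fun p => toLex p) with
  | some p => (pvConvert? p.2).getD 0   -- convert never raises here: p.2 ∈ ALL_DIGITS
  | none => 0                           -- ValueError: outside Pre_

-- ===== PORT B =====
def pvWORD_VALUES : List (String × Int) :=
  [("one", 1), ("two", 2), ("three", 3), ("four", 4), ("five", 5),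
   ("six", 6), ("seven", 7), ("eight", 8), ("nine", 9)]

-- the inner 'for word, value in WORD_VALUES' loop
def pvWordScan : List (String × Int) → List Char → Option Int
  | [], _ => none
  | (w, v) :: rest, suf =>
    if PySem.Chars.startswith suf w.toList then some v else pvWordScan rest suf

-- one iteration of the backward loop at position i (called only with i < cs.length)
def pvCheckAt (cs : List Char) (i : Nat) : Option Int :=
  let c := cs.getD i ' '                                   -- line[i]
  if '1' ≤ c ∧ c ≤ '9' then some ((c.toNat : Int) - 48)    -- ord(c) - ord('0')
  else pvWordScan pvWORD_VALUES (cs.drop i)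

-- 'for i in range(len(line) - 1, -1, -1)' with early return
def pvAltScan (cs : List Char) : Nat → Option Int
  | 0 => none
  | j + 1 =>
    match pvCheckAt cs j with
    | some v => some v
    | none => pvAltScan cs j

def get_last_digit_alt (line : String) : Int :=
  (pvAltScan line.toList line.toList.length).getD 0   -- none = raise ValueError: outside Pre_

-- ===== PRECONDITION & SPEC =====
-- Pre_ excludes exactly the lines containing no digit pattern: there A's max() raises
-- ValueError on an empty list and B raises ValueError too.
def Pre_get_last_digit (line : String) : Prop :=
  pvALL.any (fun d => PySem.Str.isIn d line) = true

instance (line : String) : Decidable (Pre_get_last_digit line) := by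
  unfold Pre_get_last_digit; infer_instance

def pvWitness_get_last_digit : String := "xtwone3z"

def Spec_get_last_digit (line : String) (out : Int) : Prop := out = get_last_digit_alt line
instance (line : String) (out : Int) : Decidable (Spec_get_last_digit line out) := by unfold Spec_get_last_digit; infer_instance

-- ===== CLAIM (what is proved, stated in full; the proofs are below) =====
def Claim_equal_get_last_digit : Prop := ∀ (line : String), Dom_get_last_digit line → Pre_get_last_digit line → Spec_get_last_digit line (get_last_digit line)

-- ===== LEMMAS AND PROOFS =====

-- a position where some digit pattern starts
def pvMatchAt (cs : List Char) (i : Nat) : Prop := ∃ d ∈ pvALL, d.toList <+: cs.drop i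

theorem pvALL_ne_nil : ∀ d ∈ pvALL, d.toList ≠ [] := by decide

theorem pvWV_fst_mem : ∀ p ∈ pvWORD_VALUES, p.1 ∈ pvALL := by decide

-- characterization of CPython str.rfind's descending scan
theorem pvGo_spec (cs sub : List Char) : ∀ j : Nat,
    (PySem.Chars.rfind.go cs sub j = -1 ∧ ∀ i ≤ j, ¬ sub <+: cs.drop i) ∨
    (∃ i : Nat, i ≤ j ∧ PySem.Chars.rfind.go cs sub j = (i : Int) ∧ sub <+: cs.drop i ∧
      ∀ k, i < k → k ≤ j → ¬ sub <+: cs.drop k) := by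
  intro j
  induction j with
  | zero =>
    by_cases h : sub.isPrefixOf cs
    · right
      exact ⟨0, le_refl _, by simp [PySem.Chars.rfind.go, h],
        by simpa using List.isPrefixOf_iff_prefix.1 h, fun k hk hk' => by omega⟩
    · left
      refine ⟨by simp [PySem.Chars.rfind.go, h], ?_⟩
      intro i hi
      interval_cases i
      simpa using fun hp => h (List.isPrefixOf_iff_prefix.2 hp)
  | succ j ih =>
    by_cases h : sub.isPrefixOf (cs.drop (j+1))
    · right
      refine ⟨j+1, le_refl _, by simp [PySem.Chars.rfind.go, h], List.isPrefixOf_iff_prefix.1 h,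
        fun k hk hk' => by omega⟩
    · have hgo : PySem.Chars.rfind.go cs sub (j+1) = PySem.Chars.rfind.go cs sub j := by
        simp [PySem.Chars.rfind.go, h]
      have hnp : ¬ sub <+: cs.drop (j+1) := fun hp => h (List.isPrefixOf_iff_prefix.2 hp)
      rcases ih with ⟨h1, h2⟩ | ⟨i, hi, h1, h2, h3⟩
      · left
        refine ⟨hgo.trans h1, fun i hi => ?_⟩
        rcases Nat.lt_succ_iff_lt_or_eq.1 (Nat.lt_succ_of_le hi) with h' | rfl
        · exact h2 i (by omega)
        · exact hnp
      · right
        refine ⟨i, by omega, hgo.trans h1, h2, fun k hk hk' => ?_⟩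
        rcases Nat.lt_succ_iff_lt_or_eq.1 (Nat.lt_succ_of_le hk') with h' | rfl
        · exact h3 k hk (by omega)
        · exact hnp

theorem pvRfind_spec (cs sub : List Char) (hs : sub ≠ []) :
    (PySem.Chars.rfind cs sub = -1 ∧ ∀ i, ¬ sub <+: cs.drop i) ∨
    (∃ i : Nat, PySem.Chars.rfind cs sub = (i : Int) ∧ sub <+: cs.drop i ∧
      ∀ k, i < k → ¬ sub <+: cs.drop k) := by
  have hbig : ∀ k, cs.length < k → ¬ sub <+: cs.drop k := by
    intro k hk hp
    rw [List.drop_eq_nil_of_le (by omega)] at hp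
    exact hs (List.prefix_nil.1 hp)
  rcases pvGo_spec cs sub cs.length with ⟨h1, h2⟩ | ⟨i, hi, h1, h2, h3⟩
  · left
    refine ⟨h1, fun i => ?_⟩
    by_cases hle : i ≤ cs.length
    · exact h2 i hle
    · exact hbig i (by omega)
  · right
    refine ⟨i, h1, h2, fun k hk => ?_⟩
    by_cases hle : k ≤ cs.length
    · exact h3 k hk hle
    · exact hbig k (by omega)

theorem pvWordScan_none (l : List (String × Int)) (suf : List Char)
    (h : ∀ p ∈ l, ¬ p.1.toList <+: suf) : pvWordScan l suf = none := by
  induction l with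
  | nil => rfl
  | cons p rest ih =>
    obtain ⟨w, v⟩ := p
    have hw : ¬ w.toList <+: suf := h (w, v) (by simp)
    have hb : PySem.Chars.startswith suf w.toList = false := by
      rw [PySem.Chars.startswith]
      exact Bool.eq_false_iff.2 (fun hh => hw (List.isPrefixOf_iff_prefix.1 hh))
    simp only [pvWordScan, hb, Bool.false_eq_true, if_false]
    exact ih (fun p hp => h p (by simp [hp]))

-- no match at i → the loop body at i finds nothing
theorem pvCheckAt_none (cs : List Char) (i : Nat) (hi : i < cs.length)
    (h : ¬ pvMatchAt cs i) : pvCheckAt cs i = none := by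
  have hdrop : cs.drop i = cs[i] :: cs.drop (i + 1) := (List.getElem_cons_drop hi).symm
  have hc : cs.getD i ' ' = cs[i] := List.getD_eq_getElem cs ' ' hi
  by_cases hdig : ('1' ≤ cs.getD i ' ' ∧ cs.getD i ' ' ≤ '9')
  · exfalso
    rw [hc] at hdig
    have hmem : cs[i] ∈ ['1','2','3','4','5','6','7','8','9'] := by
      have n1 : 49 ≤ (cs[i]).val.toNat := by exact_mod_cast UInt32.le_iff_toNat_le.1 hdig.1
      have n2 : (cs[i]).val.toNat ≤ 57 := by exact_mod_cast UInt32.le_iff_toNat_le.1 hdig.2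
      have hd9 : (cs[i]).val.toNat = 49 ∨ (cs[i]).val.toNat = 50 ∨ (cs[i]).val.toNat = 51 ∨
          (cs[i]).val.toNat = 52 ∨ (cs[i]).val.toNat = 53 ∨ (cs[i]).val.toNat = 54 ∨
          (cs[i]).val.toNat = 55 ∨ (cs[i]).val.toNat = 56 ∨ (cs[i]).val.toNat = 57 := by omega
      rcases hd9 with hh|hh|hh|hh|hh|hh|hh|hh|hh <;>
        simp [Char.ext_iff, ← UInt32.toNat_inj, hh]
    simp only [List.mem_cons, List.not_mem_nil, or_false] at hmem
    rcases hmem with hh|hh|hh|hh|hh|hh|hh|hh|hh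
    · exact h ⟨"1", by decide, by rw [hdrop, hh]; exact ⟨_, rfl⟩⟩
    · exact h ⟨"2", by decide, by rw [hdrop, hh]; exact ⟨_, rfl⟩⟩
    · exact h ⟨"3", by decide, by rw [hdrop, hh]; exact ⟨_, rfl⟩⟩
    · exact h ⟨"4", by decide, by rw [hdrop, hh]; exact ⟨_, rfl⟩⟩
    · exact h ⟨"5", by decide, by rw [hdrop, hh]; exact ⟨_, rfl⟩⟩
    · exact h ⟨"6", by decide, by rw [hdrop, hh]; exact ⟨_, rfl⟩⟩
    · exact h ⟨"7", by decide, by rw [hdrop, hh]; exact ⟨_, rfl⟩⟩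
    · exact h ⟨"8", by decide, by rw [hdrop, hh]; exact ⟨_, rfl⟩⟩
    · exact h ⟨"9", by decide, by rw [hdrop, hh]; exact ⟨_, rfl⟩⟩
  · simp only [pvCheckAt]
    rw [if_neg hdig]
    exact pvWordScan_none _ _ (fun p hp hpre => h ⟨p.1, pvWV_fst_mem p hp, hpre⟩)

-- the backward loop skips a matchless region
theorem pvAltScan_skip (cs : List Char) (m : Nat) : ∀ j : Nat, j ≤ cs.length → m < j →
    (∀ i, m < i → i < j → ¬ pvMatchAt cs i) → pvAltScan cs j = pvAltScan cs (m + 1) := by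
  intro j
  induction j with
  | zero => omega
  | succ j ih =>
    intro hlen hmj hno
    rcases Nat.lt_succ_iff_lt_or_eq.1 hmj with h' | rfl
    · have hz : pvCheckAt cs j = none :=
        pvCheckAt_none cs j (by omega) (hno j h' (by omega))
      simp only [pvAltScan, hz]
      exact ih (by omega) h' (fun i h1 h2 => hno i h1 (by omega))
    · rfl

-- the loop body at a position where pattern d starts returns convert(d)
theorem pvCheckAt_match (cs : List Char) (m : Nat) (d : String) (hd : d ∈ pvALL)
    (hpre : d.toList <+: cs.drop m) : pvCheckAt cs m = some ((pvConvert? d).getD 0) := by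
  obtain ⟨t, ht⟩ := hpre
  simp only [pvALL, pvALPHA, pvNUM, List.mem_append, List.mem_cons, List.not_mem_nil,
    or_false] at hd
  rcases hd with (rfl|rfl|rfl|rfl|rfl|rfl|rfl|rfl|rfl)|(rfl|rfl|rfl|rfl|rfl|rfl|rfl|rfl|rfl) <;>
  · simp only [pvCheckAt, List.getD_eq_getElem?_getD, ← List.head?_drop, ← ht]
    simp [pvWordScan, pvWORD_VALUES, PySem.Chars.startswith, List.isPrefixOf]
    try decide

-- ===== VERDICT (by name: the statement is the Claim_ definition above) =====
theorem get_last_digit_spec : Claim_equal_get_last_digit := by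
  intro line _hdom hpre
  unfold Spec_get_last_digit
  set cs := line.toList with hcs
  set F := (pvALL.map (fun d => (PySem.Str.rfind line d, d))).filter (fun p => p.1 != -1)
    with hF
  -- some pattern occurs, so A's filtered list is nonempty
  obtain ⟨d0, hd0, hin0⟩ : ∃ d ∈ pvALL, PySem.Str.isIn d line = true := by
    simpa [Pre_get_last_digit, List.any_eq_true] using hpre
  have hex0 : ∃ j, d0.toList <+: cs.drop j := by
    rw [PySem.Chars.exists_prefix_drop_iff_isIn]
    simpa [PySem.Str.isIn] using hin0
  have hne : F ≠ [] := by
    rcases pvRfind_spec cs d0.toList (pvALL_ne_nil d0 hd0) with ⟨_, h2⟩ | ⟨i0, e0, _, _⟩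
    · obtain ⟨j, hj⟩ := hex0
      exact absurd hj (h2 j)
    · have hmem : ((i0 : Int), d0) ∈ F := by
        rw [hF]
        refine List.mem_filter.2 ⟨List.mem_map.2 ⟨d0, hd0, ?_⟩, by simp⟩
        rw [PySem.Str.rfind_eq, ← hcs, e0]
      exact fun h0 => by simp [h0] at hmem
  obtain ⟨p, hp⟩ : ∃ p, PySem.List.max? F (fun p => toLex p) = some p := by
    cases hmax : PySem.List.max? F (fun p => toLex p)
    · exact absurd ((PySem.List.max?_eq_none_iff _ _).1 hmax) hne
    · exact ⟨_, rfl⟩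
  have hpF := PySem.List.max?_mem hp
  obtain ⟨hpmap, hpne⟩ := List.mem_filter.1 hpF
  obtain ⟨dstar, hdstar, hpair⟩ := List.mem_map.1 hpmap
  obtain ⟨p1, p2⟩ := p
  obtain ⟨he1, he2⟩ := Prod.mk.inj hpair.symm
  subst he2
  rcases pvRfind_spec cs p2.toList (pvALL_ne_nil p2 hdstar) with ⟨hneg, _⟩ | ⟨m, hm1, hm2, hm3⟩
  · rw [PySem.Str.rfind_eq, ← hcs, hneg] at he1
    simp [← he1] at hpne
  · have hp1 : p1 = (m : Int) := by rw [he1, PySem.Str.rfind_eq, ← hcs, hm1]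
    subst hp1
    -- no pattern starts after position m
    have hglob : ∀ i, m < i → ¬ pvMatchAt cs i := by
      rintro i him ⟨d', hd', hp'⟩
      rcases pvRfind_spec cs d'.toList (pvALL_ne_nil d' hd') with ⟨_, hnall⟩ | ⟨i', e', _, h3'⟩
      · exact hnall i hp'
      · have hii' : i ≤ i' := by
          by_contra hlt
          exact h3' i (by omega) hp'
        have hmemF : ((i' : Int), d') ∈ F := by
          rw [hF]
          refine List.mem_filter.2 ⟨List.mem_map.2 ⟨d', hd', ?_⟩, by simp⟩
          rw [PySem.Str.rfind_eq, ← hcs, e']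
        have hle := PySem.List.max?_isMax hp _ hmemF
        rcases Prod.Lex.toLex_le_toLex.1 hle with hlt | ⟨heq, _⟩
        · have : (i' : Int) < (m : Int) := hlt
          omega
        · have : (i' : Int) = (m : Int) := heq
          omega
    have hmlen : m < cs.length := by
      by_contra hle
      rw [List.drop_eq_nil_of_le (by omega)] at hm2
      exact pvALL_ne_nil p2 hdstar (List.prefix_nil.1 hm2)
    have hA : get_last_digit line = (pvConvert? p2).getD 0 := by
      have hbody : get_last_digit line =
          match PySem.List.max? F (fun p => toLex p) with
          | some p => (pvConvert? p.2).getD 0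
          | none => 0 := rfl
      rw [hbody, hp]
    have hB : get_last_digit_alt line = (pvConvert? p2).getD 0 := by
      have hbody : get_last_digit_alt line = (pvAltScan cs cs.length).getD 0 := rfl
      rw [hbody, pvAltScan_skip cs m cs.length le_rfl hmlen (fun i h1 _ => hglob i h1)]
      simp only [pvAltScan, pvCheckAt_match cs m p2 hdstar hm2]
      rfl
    rw [hA, hB]
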